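-- pv_equiv track=rewrite | github.com/sujoncse1803100/CSE-3209---Artificial-intelligence-AI | MJK/2nd lab/work.py | _find_grandParent
-- ===== SOURCE A (Python) =====
-- tree = {
--     "X":["A"],
--     "Y":["A","B"],
--     'A':['C','D'],
--     'B':['E'],
--     'C':['F']
-- }
--
-- def _find_parent(child):
--     parent = []
--     for p in tree:
--         for c in tree[p]:
--             if c==child:
--                 parent.append(p)
--     return parent
--
-- def _find_grandParent(child):
--     grand_parent = []
--     parent = _find_parent(child)
--     for p in parent:
--         gp = _find_parent(p)
--         for i in gp:
--             grand_parent.append(i)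
--     return grand_parent
-- ===== SOURCE B (Python) =====
-- tree = {
--     "X":["A"],
--     "Y":["A","B"],
--     'A':['C','D'],
--     'B':['E'],
--     'C':['F']
-- }
--
-- # reverse adjacency: child -> list of parents, built once in insertion order
-- _parents = {}
-- for _p in tree:
--     for _c in tree[_p]:
--         _parents.setdefault(_c, []).append(_p)
--
-- def _find_grandParent(child):
--     grand_parent = []
--     for p in _parents.get(child, []):
--         grand_parent.extend(_parents.get(p, []))
--     return grand_parent
-- ===== Notes on version B (the rewrite author's own statement) =====
-- stated objective: simpler
-- what changed: B precomputes a reverse adjacency dict (child -> parents) once at module level, so a lookup is two dict gets and a concatenation instead of A's repeated full scans of every edge via _find_parent.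
import Mathlib
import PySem

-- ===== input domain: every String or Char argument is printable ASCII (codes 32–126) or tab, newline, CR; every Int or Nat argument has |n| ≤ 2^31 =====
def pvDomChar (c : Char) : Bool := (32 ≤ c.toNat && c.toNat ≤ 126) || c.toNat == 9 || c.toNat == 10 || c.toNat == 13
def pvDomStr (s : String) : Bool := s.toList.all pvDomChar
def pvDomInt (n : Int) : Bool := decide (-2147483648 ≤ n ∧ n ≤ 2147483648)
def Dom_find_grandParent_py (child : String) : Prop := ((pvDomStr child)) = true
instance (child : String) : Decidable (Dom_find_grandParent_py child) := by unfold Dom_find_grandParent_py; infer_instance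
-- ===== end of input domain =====

-- B replaces A's per-query rescans of all edges with a reverse child->parents index built once (objective: simpler).


-- ===== PORT A =====
def pvTree : List (String × List String) :=
  [("X", ["A"]), ("Y", ["A", "B"]), ("A", ["C", "D"]), ("B", ["E"]), ("C", ["F"])]

def pvFindParent (child : String) : List String :=
  pvTree.foldl (fun parent pc =>
    pc.2.foldl (fun parent c => if c == child then parent ++ [pc.1] else parent) parent) []

def find_grandParent_py (child : String) : List String :=
  (pvFindParent child).foldl (fun grand_parent p =>
    (pvFindParent p).foldl (fun grand_parent i => grand_parent ++ [i]) grand_parent) []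

-- ===== PORT B =====
-- reverse adjacency index child -> parents, built once (Source B's module-level loop)
def pvParents : PySem.Dict String (List String) :=
  pvTree.foldl (fun d pc =>
    pc.2.foldl (fun d c => d.insert c (d.getD c [] ++ [pc.1])) d) PySem.Dict.empty

def find_grandParent_py_alt (child : String) : List String :=
  (pvParents.getD child []).foldl (fun grand_parent p => grand_parent ++ pvParents.getD p []) []

-- ===== PRECONDITION & SPEC =====
def Spec_find_grandParent_py (child : String) (out : List String) : Prop := out = find_grandParent_py_alt child
instance (child : String) (out : List String) : Decidable (Spec_find_grandParent_py child out) := by unfold Spec_find_grandParent_py; infer_instance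

-- ===== CLAIM (what is proved, stated in full; the proofs are below) =====
def Claim_equal_find_grandParent_py : Prop := ∀ (child : String), Dom_find_grandParent_py child → Spec_find_grandParent_py child (find_grandParent_py child)

-- ===== LEMMAS AND PROOFS =====

-- ===== VERDICT (by name: the statement is the Claim_ definition above) =====
lemma pvParents_eq : pvParents = PySem.Dict.mk
    [("A", ["X", "Y"]), ("B", ["Y"]), ("C", ["A"]), ("D", ["A"]), ("E", ["B"]), ("F", ["C"])] := by
  decide

theorem find_grandParent_py_spec : Claim_equal_find_grandParent_py := by
  intro child _
  unfold Spec_find_grandParent_py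
  by_cases hA : child = "A"; · subst hA; decide
  by_cases hB : child = "B"; · subst hB; decide
  by_cases hC : child = "C"; · subst hC; decide
  by_cases hD : child = "D"; · subst hD; decide
  by_cases hE : child = "E"; · subst hE; decide
  by_cases hF : child = "F"; · subst hF; decide
  simp [find_grandParent_py, find_grandParent_py_alt, pvFindParent, pvTree, pvParents_eq,
    PySem.Dict.getD, PySem.Dict.get?, List.foldl,
    Ne.symm hA, Ne.symm hB, Ne.symm hC, Ne.symm hD, Ne.symm hE, Ne.symm hF]
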